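-- pv_equiv track=rewrite | github.com/Saurav-TB-Pandey/Code-Chef-Problems | String Problems/HAPPYSTR.py | solution
-- ===== SOURCE A (Python) =====
-- def solution(string) :
--     if 'a' or 'e' or 'i' or 'o' or 'u' in string :
--         for i in range(len(string)-2) :
--             if (string[i]=='a' or string[i]=='e' or string[i]=='i' or string[i]=='o' or string[i]=='u') and (string[i+1]=='a' or string[i+1]=='e' or string[i+1]=='i' or string[i+1]=='o' or string[i+1]=='u') and (string[i+2]=='a' or string[i+2]=='e' or string[i+2]=='i' or string[i+2]=='o' or string[i+2]=='u') :
--                 return 'Happy'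
--         else :
--             return 'Sad'
--     else :
--         return 'Sad'
-- ===== SOURCE B (Python) =====
-- def solution(string):
--     run = 0
--     for c in string:
--         if c in 'aeiou':
--             run += 1
--             if run == 3:
--                 return 'Happy'
--         else:
--             run = 0
--     return 'Sad'
-- ===== Notes on version B (the rewrite author's own statement) =====
-- stated objective: simpler
-- what changed: Replaces A's indexed loop testing three offsets per position with a single pass over characters maintaining a running count of consecutive vowels, returning the happy verdict the moment the count reaches three.
import Mathlib
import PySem

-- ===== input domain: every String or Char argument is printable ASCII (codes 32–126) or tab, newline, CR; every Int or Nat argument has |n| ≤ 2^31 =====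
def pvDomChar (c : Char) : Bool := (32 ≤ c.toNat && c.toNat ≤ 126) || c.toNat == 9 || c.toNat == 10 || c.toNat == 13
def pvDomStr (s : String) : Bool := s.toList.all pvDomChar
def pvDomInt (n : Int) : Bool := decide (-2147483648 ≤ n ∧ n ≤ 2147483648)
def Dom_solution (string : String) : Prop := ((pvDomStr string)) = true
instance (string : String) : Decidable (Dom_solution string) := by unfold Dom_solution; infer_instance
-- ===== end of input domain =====

-- B replaces A's three-offset index scan by a one-pass running count of consecutive vowels (simpler decomposition, same O(n) cost).

-- ===== PORT A =====
-- the five 'x == vowel' comparisons A repeats for each position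
def pvVowel (c : Char) : Bool := c == 'a' || c == 'e' || c == 'i' || c == 'o' || c == 'u'

-- A's for-loop over i in range(len(string)-2); string[i..i+2] are always in range
-- for these i, so pyGetD's default ' ' is never used (exact port of the indexing).
def solLoopA (cs : List Char) : List Int → String
  | [] => "Sad"   -- the for-else: loop finished without returning
  | i :: rest =>
    if pvVowel (PySem.List.pyGetD cs i ' ') && pvVowel (PySem.List.pyGetD cs (i+1) ' ')
        && pvVowel (PySem.List.pyGetD cs (i+2) ' ') then "Happy"
    else solLoopA cs rest

-- A's outer `if 'a' or 'e' or … in string` is always truthy in Python ('a' is a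
-- non-empty string), so the then-branch is always taken.
def solution (string : String) : String :=
  solLoopA string.toList (PySem.List.pyRange 0 ((string.toList.length : Int) - 2) 1)

-- ===== PORT B =====
def solGoB : List Char → Nat → String
  | [], _ => "Sad"
  | c :: rest, run =>
    if pvVowel c then
      if run + 1 == 3 then "Happy" else solGoB rest (run + 1)
    else solGoB rest 0

def solution_alt (string : String) : String := solGoB string.toList 0

-- ===== PRECONDITION & SPEC =====
def Spec_solution (string : String) (out : String) : Prop := out = solution_alt string
instance (string : String) (out : String) : Decidable (Spec_solution string out) := by unfold Spec_solution; infer_instance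

-- ===== CLAIM (what is proved, stated in full; the proofs are below) =====
def Claim_equal_solution : Prop := ∀ (string : String), Dom_solution string → Spec_solution string (solution string)

-- ===== LEMMAS AND PROOFS =====

-- reference characterisation: does the list contain three consecutive vowels?
def hasT : List Char → Bool
  | a :: b :: c :: rest => (pvVowel a && pvVowel b && pvVowel c) || hasT (b :: c :: rest)
  | _ => false

def hT (cs : List Char) : String := if hasT cs then "Happy" else "Sad"

-- A's loop over an index list is an 'any' over that list
theorem solLoopA_any (cs : List Char) (l : List Int) :
    solLoopA cs l = if l.any (fun i => pvVowel (PySem.List.pyGetD cs i ' ')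
        && pvVowel (PySem.List.pyGetD cs (i+1) ' ')
        && pvVowel (PySem.List.pyGetD cs (i+2) ' ')) then "Happy" else "Sad" := by
  induction l with
  | nil => simp [solLoopA]
  | cons i rest ih =>
    simp only [solLoopA, List.any_cons, ih]
    by_cases h : (pvVowel (PySem.List.pyGetD cs i ' ') && pvVowel (PySem.List.pyGetD cs (i+1) ' ')
        && pvVowel (PySem.List.pyGetD cs (i+2) ' ')) = true <;> simp [h]

theorem range_any_hasT (cs : List Char) :
    ((List.range (cs.length - 2)).any (fun k => pvVowel (cs.getD k ' ')
      && pvVowel (cs.getD (k+1) ' ') && pvVowel (cs.getD (k+2) ' '))) = hasT cs := by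
  match cs with
  | [] => simp [hasT]
  | [a] => simp [hasT]
  | [a, b] => simp [hasT]
  | a :: b :: c :: rest =>
    have ih := range_any_hasT (b :: c :: rest)
    simp only [List.length_cons] at ih ⊢
    rw [show rest.length + 1 + 1 + 1 - 2 = (rest.length + 1 + 1 - 2) + 1 from by omega,
      List.range_succ_eq_map]
    simp only [List.any_cons, List.any_map, Function.comp_def, Nat.succ_eq_add_one,
      List.getD_cons_zero, List.getD_cons_succ] at ih ⊢
    rw [ih]
    simp [hasT]
  termination_by cs.length

theorem solution_eq_hT (s : String) : solution s = hT s.toList := by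
  unfold solution
  rw [solLoopA_any, PySem.List.pyRange_one]
  rw [show (((s.toList.length : Int) - 2) - 0).toNat = s.toList.length - 2 from by omega]
  rw [List.any_map]
  have hfun : ((fun i : Int => pvVowel (PySem.List.pyGetD s.toList i ' ')
      && pvVowel (PySem.List.pyGetD s.toList (i+1) ' ')
      && pvVowel (PySem.List.pyGetD s.toList (i+2) ' ')) ∘ fun k : Nat => (0:Int) + k)
      = (fun k : Nat => pvVowel (s.toList.getD k ' ')
      && pvVowel (s.toList.getD (k+1) ' ') && pvVowel (s.toList.getD (k+2) ' ')) := by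
    funext k
    have e1 : ((k:Int)) + 1 = ((k+1 : Nat) : Int) := by push_cast; ring
    have e2 : ((k:Int)) + 2 = ((k+2 : Nat) : Int) := by push_cast; ring
    simp only [Function.comp, zero_add, e1, e2, PySem.List.pyGetD_natCast]
  rw [hfun, range_any_hasT, hT]

theorem pvVowel_a : pvVowel 'a' = true := by decide

theorem hasT_head (c : Char) (rest : List Char) :
    hasT (c :: rest) = if pvVowel c then hasT ('a' :: rest) else hasT rest := by
  rcases rest with _ | ⟨b, _ | ⟨d, t⟩⟩
  · simp [hasT]
  · simp [hasT]
  · by_cases h : pvVowel c = true <;> simp only [hasT, h, pvVowel_a] <;> simp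

theorem hasT_head2 (c : Char) (rest : List Char) :
    hasT ('a' :: c :: rest) = if pvVowel c then hasT ('a' :: 'a' :: rest) else hasT rest := by
  rcases rest with _ | ⟨d, t⟩
  · by_cases h : pvVowel c = true <;> simp [hasT, h]
  · simp only [hasT, pvVowel_a, Bool.true_and]
    rw [hasT_head c (d :: t)]
    by_cases h : pvVowel c = true <;> simp [h]

theorem hasT_head3 (c : Char) (rest : List Char) :
    hasT ('a' :: 'a' :: c :: rest) = if pvVowel c then true else hasT rest := by
  simp only [hasT, pvVowel_a, Bool.true_and]
  rw [hasT_head2 c rest]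
  by_cases h : pvVowel c = true <;> simp [h]

theorem goB_spec (cs : List Char) :
    solGoB cs 0 = hT cs ∧ solGoB cs 1 = hT ('a' :: cs) ∧ solGoB cs 2 = hT ('a' :: 'a' :: cs) := by
  induction cs with
  | nil => refine ⟨rfl, ?_, ?_⟩ <;> decide
  | cons c rest ih =>
    obtain ⟨ih0, ih1, ih2⟩ := ih
    refine ⟨?_, ?_, ?_⟩
    · by_cases h : pvVowel c = true
      · rw [show solGoB (c :: rest) 0 = solGoB rest 1 from by simp [solGoB, h], ih1]
        unfold hT
        rw [hasT_head c rest, if_pos h]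
      · rw [show solGoB (c :: rest) 0 = solGoB rest 0 from by simp [solGoB, h], ih0]
        unfold hT
        rw [hasT_head c rest, if_neg h]
    · by_cases h : pvVowel c = true
      · rw [show solGoB (c :: rest) 1 = solGoB rest 2 from by simp [solGoB, h], ih2]
        unfold hT
        rw [hasT_head2 c rest, if_pos h]
      · rw [show solGoB (c :: rest) 1 = solGoB rest 0 from by simp [solGoB, h], ih0]
        unfold hT
        rw [hasT_head2 c rest, if_neg h]
    · by_cases h : pvVowel c = true
      · rw [show solGoB (c :: rest) 2 = "Happy" from by simp [solGoB, h]]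
        unfold hT
        simp [hasT_head3, h]
      · rw [show solGoB (c :: rest) 2 = solGoB rest 0 from by simp [solGoB, h], ih0]
        unfold hT
        rw [hasT_head3 c rest, if_neg h]

-- ===== VERDICT (by name: the statement is the Claim_ definition above) =====
theorem solution_spec : Claim_equal_solution := by
  intro s _
  show _ = _
  rw [solution_eq_hT, solution_alt, (goB_spec s.toList).1]
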